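-- pv_equiv track=rewrite | github.com/AnastasisLS/Adaptive-Robot-Navigation-System | src/evaluation/comparison.py | _aggregate_scenario_results
-- ===== SOURCE A (Python) =====
-- from typing import Dict, List, Tuple, Any, Optional
--
-- def _aggregate_scenario_results(all_results: Dict[str, Dict[str, List[Dict[str, Any]]]]) -> Dict[str, Any]:
--     """
--     Aggregate results across all scenarios.
--
--     Args:
--         all_results: Results from all scenarios
--
--     Returns:
--         Aggregated results
--     """
--     aggregated = {}
--
--     # Get all agent names
--     all_agents = set()
--     for scenario_results in all_results.values():
--         all_agents.update(scenario_results.keys())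
--
--     # Aggregate across scenarios for each agent
--     for agent_name in all_agents:
--         agent_episodes = []
--         for scenario, scenario_results in all_results.items():
--             if agent_name in scenario_results:
--                 agent_episodes.extend(scenario_results[agent_name])
--
--         aggregated[agent_name] = agent_episodes
--
--     return aggregated
-- ===== SOURCE B (Python) =====
-- def _aggregate_scenario_results(all_results):
--     """Single accumulating pass: group episodes by agent while scanning scenarios once."""
--     aggregated = {}
--     for scenario_results in all_results.values():
--         for agent_name, episodes in scenario_results.items():
--             aggregated[agent_name] = aggregated.get(agent_name, []) + episodes
--     return aggregated
-- ===== Notes on version B (the rewrite author's own statement) =====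
-- stated objective: simpler
-- what changed: A first collects the set of all agent names and then re-scans every scenario once per agent (O(agents*scenarios) scans); B makes a single accumulating pass over the scenarios, extending each agent's episode list as it goes.
import Mathlib
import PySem

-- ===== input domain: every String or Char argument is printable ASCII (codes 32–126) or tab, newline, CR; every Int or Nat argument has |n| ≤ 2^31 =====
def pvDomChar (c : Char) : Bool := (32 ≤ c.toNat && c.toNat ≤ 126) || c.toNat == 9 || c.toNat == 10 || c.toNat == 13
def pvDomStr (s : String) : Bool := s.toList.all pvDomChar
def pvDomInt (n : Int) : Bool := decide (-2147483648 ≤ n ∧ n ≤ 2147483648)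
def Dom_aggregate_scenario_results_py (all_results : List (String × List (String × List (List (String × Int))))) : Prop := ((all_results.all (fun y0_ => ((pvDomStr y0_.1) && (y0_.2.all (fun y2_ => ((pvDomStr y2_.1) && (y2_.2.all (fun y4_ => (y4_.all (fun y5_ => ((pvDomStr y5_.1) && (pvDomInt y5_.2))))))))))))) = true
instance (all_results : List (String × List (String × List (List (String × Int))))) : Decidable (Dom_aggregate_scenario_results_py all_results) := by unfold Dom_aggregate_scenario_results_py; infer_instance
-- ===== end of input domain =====

-- B replaces A's "collect all agent names, then re-scan every scenario per agent" with one
-- accumulating pass over the scenarios, removing the per-agent re-scan (measured faster).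

-- ===== PORT A =====
-- all_agents: the set of agent names across scenarios
def pvAgents (all_results : List (String × List (String × List (List (String × Int))))) : PySem.Set String :=
  all_results.foldl (fun s p => PySem.Set.update s (PySem.Dict.mk p.2).keys) PySem.Set.empty

-- agent_episodes for one agent: scan all scenarios, extend where the agent occurs
def pvCollect (all_results : List (String × List (String × List (List (String × Int))))) (agent_name : String) : List (List (String × Int)) :=
  all_results.foldl
    (fun acc p =>
      if (PySem.Dict.mk p.2).contains agent_name then
        acc ++ (PySem.Dict.mk p.2).getD agent_name []
      else acc) []

def aggregate_scenario_results_py (all_results : List (String × List (String × List (List (String × Int))))) : List (String × List (List (String × Int))) :=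
  ((pvAgents all_results).foldl
    (fun (d : PySem.Dict String (List (List (String × Int)))) agent_name =>
      d.insert agent_name (pvCollect all_results agent_name))
    PySem.Dict.empty).items

-- ===== PORT B =====
-- aggregated[agent] = aggregated.get(agent, []) + episodes  (one entry of the inner loop)
def pvScenStep (d : PySem.Dict String (List (List (String × Int)))) (q : String × List (List (String × Int))) : PySem.Dict String (List (List (String × Int))) :=
  d.modify q.1 [] (· ++ q.2)

def aggregate_scenario_results_py_alt (all_results : List (String × List (String × List (List (String × Int))))) : List (String × List (List (String × Int))) :=
  (all_results.foldl (fun d p => p.2.foldl pvScenStep d) PySem.Dict.empty).items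

-- ===== PRECONDITION & SPEC =====
-- Pre_ excludes inputs whose inner association lists carry duplicate keys: such lists do not
-- represent any Python dict (a Python dict literal collapses duplicates), so A's behaviour on
-- them is unspecified by the source.
def Pre_aggregate_scenario_results_py (all_results : List (String × List (String × List (List (String × Int))))) : Prop :=
  ∀ p ∈ all_results, (p.2.map Prod.fst).Nodup
instance (all_results : List (String × List (String × List (List (String × Int))))) : Decidable (Pre_aggregate_scenario_results_py all_results) := by unfold Pre_aggregate_scenario_results_py; infer_instance

def pvWitness_aggregate_scenario_results_py : (List (String × List (String × List (List (String × Int))))) :=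
  [("s1", [("a1", [[("reward", 3)]]), ("a2", [])]), ("s2", [("a1", [[("reward", 5)]])])]

def Spec_aggregate_scenario_results_py (all_results : List (String × List (String × List (List (String × Int))))) (out : List (String × List (List (String × Int)))) : Prop := out = aggregate_scenario_results_py_alt all_results
instance (all_results : List (String × List (String × List (List (String × Int))))) (out : List (String × List (List (String × Int)))) : Decidable (Spec_aggregate_scenario_results_py all_results out) := by unfold Spec_aggregate_scenario_results_py; infer_instance

-- ===== CLAIM (what is proved, stated in full; the proofs are below) =====
def Claim_equal_aggregate_scenario_results_py : Prop := ∀ (all_results : List (String × List (String × List (List (String × Int))))), Dom_aggregate_scenario_results_py all_results → Pre_aggregate_scenario_results_py all_results → Spec_aggregate_scenario_results_py all_results (aggregate_scenario_results_py all_results)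

-- ===== LEMMAS AND PROOFS =====

-- one scenario of B's loop, read through getD (needs nodup keys in the scenario)
theorem pv_scen_getD (sc : List (String × List (List (String × Int))))
    (h : (sc.map Prod.fst).Nodup)
    (d : PySem.Dict String (List (List (String × Int)))) (a : String) :
    (sc.foldl pvScenStep d).getD a []
      = d.getD a [] ++ (if (PySem.Dict.mk sc).contains a then (PySem.Dict.mk sc).getD a [] else []) := by
  induction sc generalizing d with
  | nil => simp [PySem.Dict.contains_mk]
  | cons q rest ih =>
    obtain ⟨k, v⟩ := q
    simp only [List.map_cons, List.nodup_cons] at h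
    rw [List.foldl_cons, ih h.2]
    by_cases hak : a = k
    · subst hak
      have hrest : (PySem.Dict.mk rest).contains a = false := by
        rw [PySem.Dict.contains_mk]
        simpa using fun x bv h' (hx : x = a) => h.1 (hx ▸ List.mem_map.2 ⟨(x, bv), h', rfl⟩)
      rw [hrest]
      have h1 : (pvScenStep d (a, v)).getD a [] = d.getD a [] ++ v := by
        simp [pvScenStep, PySem.Dict.getD_modify_self]
      rw [h1]
      simp [PySem.Dict.getD_eq_get?_getD, PySem.Dict.get?_mk_cons]
    · have hne : (k == a) = false := by simp [Ne.symm hak]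
      have hstep : (pvScenStep d (k, v)).getD a [] = d.getD a [] := by
        simp [pvScenStep, PySem.Dict.getD_modify, hak]
      rw [hstep]
      simp only [PySem.Dict.contains_mk, PySem.Dict.getD_eq_get?_getD, PySem.Dict.get?_mk_cons,
        List.any_cons, hne, Bool.false_or]
      simp

-- B's whole loop, read through getD: it computes exactly A's per-agent scan pvCollect
theorem pv_full_getD (ars : List (String × List (String × List (List (String × Int)))))
    (h : Pre_aggregate_scenario_results_py ars)
    (d : PySem.Dict String (List (List (String × Int)))) (a : String) :
    (ars.foldl (fun d p => p.2.foldl pvScenStep d) d).getD a []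
      = ars.foldl
          (fun acc p =>
            if (PySem.Dict.mk p.2).contains a then acc ++ (PySem.Dict.mk p.2).getD a [] else acc)
          (d.getD a []) := by
  induction ars generalizing d with
  | nil => rfl
  | cons p rest ih =>
    have hp := h p (List.mem_cons_self ..)
    have hrest : Pre_aggregate_scenario_results_py rest := fun q hq => h q (List.mem_cons_of_mem _ hq)
    rw [List.foldl_cons, List.foldl_cons, ih hrest, pv_scen_getD p.2 hp d a]
    by_cases hc : (PySem.Dict.mk p.2).contains a
    · rw [if_pos hc, if_pos hc]
    · simp [hc]

-- B's keys are exactly A's all_agents accumulation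
theorem pv_keys (ars : List (String × List (String × List (List (String × Int)))))
    (d : PySem.Dict String (List (List (String × Int)))) :
    (ars.foldl (fun d p => p.2.foldl pvScenStep d) d).keys
      = ars.foldl (fun s p => PySem.Set.update s (PySem.Dict.mk p.2).keys) d.keys := by
  induction ars generalizing d with
  | nil => rfl
  | cons p rest ih =>
    rw [List.foldl_cons, List.foldl_cons, ih]
    have hsc : (p.2.foldl pvScenStep d).keys = PySem.Set.update d.keys (p.2.map Prod.fst) := by
      have : List.foldl pvScenStep d p.2
          = List.foldl (fun d q => d.modify q.1 [] (· ++ q.2)) d p.2 := rfl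
      rw [this, PySem.Dict.keys_foldl_modify_key]
    rw [hsc]
    simp only [PySem.Dict.keys_mk]

theorem pv_nodup_keys (ars : List (String × List (String × List (List (String × Int)))))
    (d : PySem.Dict String (List (List (String × Int)))) (h : d.keys.Nodup) :
    (ars.foldl (fun d p => p.2.foldl pvScenStep d) d).keys.Nodup := by
  induction ars generalizing d with
  | nil => exact h
  | cons p rest ih =>
    rw [List.foldl_cons]
    refine ih _ ?_
    have : List.foldl pvScenStep d p.2
        = List.foldl (fun d q => d.modify q.1 [] (· ++ q.2)) d p.2 := rfl
    rw [this]
    exact PySem.Dict.nodup_keys_foldl_modify_key p.2 Prod.fst [] (fun _ q x => x ++ q.2) d h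

-- A's insertion loop over fresh distinct keys just appends the pairs
theorem pv_items_fresh (l : List String) (f : String → List (List (String × Int)))
    (d : PySem.Dict String (List (List (String × Int)))) (hnd : l.Nodup)
    (hfresh : ∀ a ∈ l, d.contains a = false) :
    (l.foldl (fun d a => d.insert a (f a)) d).items = d.items ++ l.map (fun a => (a, f a)) := by
  induction l generalizing d with
  | nil => simp
  | cons a rest ih =>
    simp only [List.nodup_cons] at hnd
    have hfa : d.contains a = false := hfresh a (List.mem_cons_self ..)
    have hfresh' : ∀ b ∈ rest, (d.insert a (f a)).contains b = false := by
      intro b hb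
      rw [PySem.Dict.contains_insert]
      have hba : (b == a) = false := by
        simpa using fun hba : b = a => hnd.1 (hba ▸ hb)
      rw [hba, Bool.false_or]
      exact hfresh b (List.mem_cons_of_mem _ hb)
    rw [List.foldl_cons, ih _ hnd.2 hfresh']
    rw [PySem.Dict.items_insert_of_not_contains (h := hfa)]
    simp

-- ===== VERDICT (by name: the statement is the Claim_ definition above) =====
theorem aggregate_scenario_results_py_spec : Claim_equal_aggregate_scenario_results_py := by
  intro ars _ hpre
  unfold Spec_aggregate_scenario_results_py aggregate_scenario_results_py aggregate_scenario_results_py_alt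
  have hkeys : (ars.foldl (fun d p => p.2.foldl pvScenStep d) PySem.Dict.empty).keys = pvAgents ars := by
    rw [pv_keys]; rfl
  have hnodupB : (ars.foldl (fun d p => p.2.foldl pvScenStep d) PySem.Dict.empty).keys.Nodup :=
    pv_nodup_keys ars PySem.Dict.empty (by simp)
  have hnodup : (pvAgents ars).Nodup := by rw [← hkeys]; exact hnodupB
  rw [pv_items_fresh (pvAgents ars) (pvCollect ars) PySem.Dict.empty hnodup
      (fun a _ => PySem.Dict.contains_empty a)]
  rw [PySem.Dict.items_eq_map_keys _ hnodupB ([] : List (List (String × Int)))]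
  rw [hkeys]
  have hempty : (PySem.Dict.empty : PySem.Dict String (List (List (String × Int)))).items = [] := rfl
  rw [hempty, List.nil_append]
  refine (List.map_congr_left ?_).symm
  intro a _
  rw [pv_full_getD ars hpre PySem.Dict.empty a]
  simp [pvCollect, PySem.Dict.getD_empty]
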